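-- pv_equiv track=rewrite | github.com/piglitch/DSA | test.py | typing_distance
-- ===== SOURCE A (Python) =====
-- def typing_distance(word):
--   """Calculates the total distance traveled by a robot typing a given word on a keyboard.
--
--   Args:
--     word: A string containing only uppercase letters.
--
--   Returns:
--     The total distance traveled by the robot.
--   """
--
--   keyboard = {
--       'Q': (0, 0), 'W': (1, 0), 'E': (2, 0), 'R': (3, 0), 'T': (4, 0), 'Y': (5, 0), 'U': (6, 0), 'I': (7, 0), 'O': (8, 0), 'P': (9, 0),
--       'A': (0, 1), 'S': (1, 1), 'D': (2, 1), 'F': (3, 1), 'G': (4, 1), 'H': (5, 1), 'J': (6, 1), 'K': (7, 1), 'L': (8, 1),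
--       'Z': (0, 2), 'X': (1, 2), 'C': (2, 2), 'V': (3, 2), 'B': (4, 2), 'N': (5, 2), 'M': (6, 2)
--   }
--
--   current_pos = keyboard['Q']
--   total_distance = 0
--
--   for letter in word:
--     new_pos = keyboard[letter]
--     total_distance += abs(new_pos[0] - current_pos[0]) + abs(new_pos[1] - current_pos[1])
--     current_pos = new_pos
--
--   return total_distance
--
-- word = "QA"
-- ===== SOURCE B (Python) =====
-- def _axis(seq):
--   total = 0
--   for i in range(1, len(seq)):
--     total += abs(seq[i] - seq[i - 1])
--   return total
--
--
-- def typing_distance(word):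
--   rows = ("QWERTYUIOP", "ASDFGHJKL", "ZXCVBNM")
--   cols = [0]
--   rws = [0]
--   for c in word:
--     r = 0 if c in rows[0] else (1 if c in rows[1] else 2)
--     cols.append(rows[r].index(c))
--     rws.append(r)
--   return _axis(cols) + _axis(rws)
-- ===== Notes on version B (the rewrite author's own statement) =====
-- stated objective: alternative
-- what changed: B drops the coordinate dict and the 2D running-position accumulator: it looks each letter up by scanning three row strings (membership test + .index) to build separate column and row index sequences, then sums the column travel and the row travel in two independent index-loop passes, exploiting that Manhattan distance separates per axis.
import Mathlib
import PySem

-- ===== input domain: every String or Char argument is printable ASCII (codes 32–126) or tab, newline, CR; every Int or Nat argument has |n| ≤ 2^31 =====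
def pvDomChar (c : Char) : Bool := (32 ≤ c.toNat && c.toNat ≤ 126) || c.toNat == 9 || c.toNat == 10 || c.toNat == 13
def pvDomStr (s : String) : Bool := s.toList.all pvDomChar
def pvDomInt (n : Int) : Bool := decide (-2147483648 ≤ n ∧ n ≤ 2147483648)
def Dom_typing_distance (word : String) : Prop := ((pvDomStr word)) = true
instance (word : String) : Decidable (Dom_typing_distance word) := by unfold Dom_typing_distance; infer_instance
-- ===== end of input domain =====

-- B decomposes the travel per axis: it looks characters up by scanning three row strings (no dict) and sums
-- column travel and row travel in two separate index-loop passes; same O(n) cost (objective: alternative).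

-- ===== PORT A =====
-- the keyboard dict literal from A
def pvKeyboard : PySem.Dict Char (Int × Int) := PySem.Dict.ofList
  [('Q', (0, 0)), ('W', (1, 0)), ('E', (2, 0)), ('R', (3, 0)), ('T', (4, 0)), ('Y', (5, 0)), ('U', (6, 0)), ('I', (7, 0)), ('O', (8, 0)), ('P', (9, 0)),
   ('A', (0, 1)), ('S', (1, 1)), ('D', (2, 1)), ('F', (3, 1)), ('G', (4, 1)), ('H', (5, 1)), ('J', (6, 1)), ('K', (7, 1)), ('L', (8, 1)),
   ('Z', (0, 2)), ('X', (1, 2)), ('C', (2, 2)), ('V', (3, 2)), ('B', (4, 2)), ('N', (5, 2)), ('M', (6, 2))]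

-- keyboard[letter]: KeyError (excluded by Pre_) is represented by getD's default, never reached inside Pre_
def typing_distance (word : String) : Int :=
  (word.toList.foldl
    (fun (st : (Int × Int) × Int) letter =>
      let new_pos := PySem.Dict.getD pvKeyboard letter (0, 0)
      (new_pos, st.2 + |new_pos.1 - st.1.1| + |new_pos.2 - st.1.2|))
    (PySem.Dict.getD pvKeyboard 'Q' (0, 0), 0)).2

-- ===== PORT B =====
-- the three keyboard rows of Source B (strings, ported as their character lists)
def pvRows : List (List Char) :=
  [['Q','W','E','R','T','Y','U','I','O','P'],
   ['A','S','D','F','G','H','J','K','L'],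
   ['Z','X','C','V','B','N','M']]

-- _axis(seq): index loop 'for i in range(1, len(seq))' summing |seq[i] - seq[i-1]|
def pvAxis (seq : List Int) : Int :=
  (PySem.List.pyRange 1 (seq.length : Int) 1).foldl
    (fun total i => total + |PySem.List.pyGetD seq i 0 - PySem.List.pyGetD seq (i - 1) 0|) 0

-- rows[r].index(c): ValueError (excluded by Pre_) is represented by index?'s getD default, never reached inside Pre_
def typing_distance_alt (word : String) : Int :=
  let st := word.toList.foldl
    (fun (p : List Int × List Int) c =>
      let r : Int := if (PySem.List.pyGetD pvRows 0 []).contains c then 0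
                     else if (PySem.List.pyGetD pvRows 1 []).contains c then 1 else 2
      let i : Int := (((PySem.List.index? (PySem.List.pyGetD pvRows r []) c).getD 0 : Nat) : Int)
      (p.1 ++ [i], p.2 ++ [r]))
    ([0], [0])
  pvAxis st.1 + pvAxis st.2

-- ===== PRECONDITION & SPEC =====
def pvKeys : List Char :=
  ['Q','W','E','R','T','Y','U','I','O','P','A','S','D','F','G','H','J','K','L','Z','X','C','V','B','N','M']

-- Pre_ excludes exactly the words containing a character outside the 26 uppercase letters, on which A raises KeyError.
def Pre_typing_distance (word : String) : Prop := word.toList.all (fun c => pvKeys.contains c) = true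
instance (word : String) : Decidable (Pre_typing_distance word) := by unfold Pre_typing_distance; infer_instance
def pvWitness_typing_distance : String := "QA"
def Spec_typing_distance (word : String) (out : Int) : Prop := out = typing_distance_alt word
instance (word : String) (out : Int) : Decidable (Spec_typing_distance word out) := by unfold Spec_typing_distance; infer_instance

-- ===== CLAIM (what is proved, stated in full; the proofs are below) =====
def Claim_equal_typing_distance : Prop := ∀ (word : String), Dom_typing_distance word → Pre_typing_distance word → Spec_typing_distance word (typing_distance word)

-- ===== LEMMAS AND PROOFS =====

-- B's per-character row and column, as functions (exactly the body of B's loop)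
def pvRowF (c : Char) : Int :=
  if (PySem.List.pyGetD pvRows 0 []).contains c then 0
  else if (PySem.List.pyGetD pvRows 1 []).contains c then 1 else 2
def pvColF (c : Char) : Int :=
  (((PySem.List.index? (PySem.List.pyGetD pvRows (pvRowF c) []) c).getD 0 : Nat) : Int)

-- on the 26 keyboard letters, A's dict lookup agrees with B's row-scan lookup
theorem pv_charPos (c : Char) (h : pvKeys.contains c = true) :
    PySem.Dict.getD pvKeyboard c (0, 0) = (pvColF c, pvRowF c) := by
  have h' : c ∈ pvKeys := by simpa using h
  fin_cases h' <;> decide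

-- structural adjacent-difference sum
def pairSum : List Int → Int
  | a :: b :: t => |b - a| + pairSum (b :: t)
  | _ => 0

-- indexing a cons cell at a positive Python index steps into the tail
theorem pv_pyGetD_cons_pos {α : Type} (x : α) (xs : List α) (i : Int) (d : α) (h : 1 ≤ i) :
    PySem.List.pyGetD (x :: xs) i d = PySem.List.pyGetD xs (i - 1) d := by
  simp only [PySem.List.pyGetD, PySem.List.pyGet?, PySem.List.pyIdx?, List.length_cons]
  split_ifs with h1 h2 h3 h4 h5 <;> try omega
  · rw [show i.toNat = (i - 1).toNat + 1 by omega]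
    simp
  · simp

theorem pv_pairSum_cons_cons (a b : Int) (t : List Int) :
    pairSum (a :: b :: t) = |b - a| + pairSum (b :: t) := rfl

theorem pv_axis_eq_pairSum (s : List Int) : pvAxis s = pairSum s := by
  induction s with
  | nil => decide
  | cons a t ih =>
    cases t with
    | nil =>
      unfold pvAxis
      rw [PySem.List.pyRange_one_eq_nil (by simp)]
      rfl
    | cons b t' =>
      unfold pvAxis
      have hlen : (((a :: b :: t').length : Nat) : Int) = (t'.length : Int) + 2 := by
        simp; omega
      rw [hlen, PySem.List.pyRange_one_cons (by omega)]
      simp only [List.foldl_cons]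
      have h01 : (0 : Int) + |PySem.List.pyGetD (a :: b :: t') 1 0 - PySem.List.pyGetD (a :: b :: t') (1 - 1) 0| = |b - a| := by
        rw [pv_pyGetD_cons_pos _ _ _ _ (by omega)]
        norm_num [PySem.List.pyGetD_zero_cons]
      rw [h01]
      have hrange : PySem.List.pyRange (1 + 1) ((t'.length : Int) + 2) 1
          = (PySem.List.pyRange 1 ((t'.length : Int) + 1) 1).map (fun i => i + 1) := by
        rw [PySem.List.pyRange_one, PySem.List.pyRange_one]
        rw [show ((t'.length : Int) + 2 - (1 + 1)).toNat = ((t'.length : Int) + 1 - 1).toNat by omega,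
            List.map_map]
        exact List.map_congr_left (fun k _ => by simp; ring)
      rw [hrange, List.foldl_map]
      have hcongr : ∀ (acc : Int), ∀ i ∈ PySem.List.pyRange 1 ((t'.length : Int) + 1) 1,
          (fun total i => total + |PySem.List.pyGetD (a :: b :: t') (i + 1) 0 - PySem.List.pyGetD (a :: b :: t') (i + 1 - 1) 0|) acc i
          = (fun total i => total + |PySem.List.pyGetD (b :: t') i 0 - PySem.List.pyGetD (b :: t') (i - 1) 0|) acc i := by
        intro acc i hi
        rw [PySem.List.mem_pyRange_one] at hi
        simp only
        rw [show i + 1 - 1 = i by ring]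
        rw [pv_pyGetD_cons_pos a (b :: t') (i + 1) 0 (by omega)]
        rw [show i + 1 - 1 = i by ring]
        rw [pv_pyGetD_cons_pos a (b :: t') i 0 (by omega)]
      rw [PySem.List.foldl_congr_mem _ _ _ _ hcongr]
      rw [show (|b - a| : Int) = |b - a| + 0 by ring, PySem.List.foldl_add]
      have hb : pvAxis (b :: t') = pairSum (b :: t') := ih
      unfold pvAxis at hb
      rw [PySem.List.foldl_add] at hb
      rw [pv_pairSum_cons_cons]
      rw [show (((b :: t').length : Nat) : Int) = (t'.length : Int) + 1 by simp] at hb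
      simp only [zero_add] at hb ⊢
      rw [hb]
      ring

-- B's loop materializes exactly the mapped column and row sequences
theorem pv_b_fold (l : List Char) (p1 p2 : List Int) :
    l.foldl
      (fun (p : List Int × List Int) c =>
        let r : Int := if (PySem.List.pyGetD pvRows 0 []).contains c then 0
                       else if (PySem.List.pyGetD pvRows 1 []).contains c then 1 else 2
        let i : Int := (((PySem.List.index? (PySem.List.pyGetD pvRows r []) c).getD 0 : Nat) : Int)
        (p.1 ++ [i], p.2 ++ [r]))
      (p1, p2)
    = (p1 ++ l.map pvColF, p2 ++ l.map pvRowF) := by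
  induction l generalizing p1 p2 with
  | nil => simp
  | cons c t ih =>
    simp only [List.foldl_cons, List.map_cons]
    rw [ih]
    simp [pvColF, pvRowF]

-- A's running-position fold computes the per-axis pair sums of the materialized sequences
theorem pv_a_fold (l : List Char) (hl : ∀ c ∈ l, pvKeys.contains c = true) (x y t : Int) :
    (l.foldl
      (fun (st : (Int × Int) × Int) letter =>
        let new_pos := PySem.Dict.getD pvKeyboard letter (0, 0)
        (new_pos, st.2 + |new_pos.1 - st.1.1| + |new_pos.2 - st.1.2|))
      ((x, y), t)).2
    = t + pairSum (x :: l.map pvColF) + pairSum (y :: l.map pvRowF) := by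
  induction l generalizing x y t with
  | nil => simp [pairSum]
  | cons c tl ih =>
    simp only [List.foldl_cons, List.map_cons]
    have hc := pv_charPos c (hl c (by simp))
    simp only [hc]
    rw [ih (fun d hd => hl d (List.mem_cons_of_mem _ hd))]
    rw [pv_pairSum_cons_cons, pv_pairSum_cons_cons]
    ring

-- ===== VERDICT (by name: the statement is the Claim_ definition above) =====
theorem typing_distance_spec : Claim_equal_typing_distance := by
  intro word _ hpre
  unfold Spec_typing_distance typing_distance typing_distance_alt
  have hall : ∀ c ∈ word.toList, pvKeys.contains c = true := by
    intro c hc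
    unfold Pre_typing_distance at hpre
    rw [List.all_eq_true] at hpre
    exact hpre c hc
  rw [pv_b_fold]
  simp only [List.singleton_append]
  rw [pv_axis_eq_pairSum, pv_axis_eq_pairSum]
  have hQ : PySem.Dict.getD pvKeyboard 'Q' (0, 0) = ((0 : Int), (0 : Int)) := by decide
  rw [hQ, pv_a_fold word.toList hall 0 0 0]
  ring
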